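-- pv_equiv track=rewrite | github.com/MiguelFernandesSantos/Python | Fatec/algo2.py | moda
-- ===== SOURCE A (Python) =====
-- def moda(valores=()):
--     dic = {item: 0 for item in valores}
--     for item in valores:
--         if item in dic.keys():
--             dic[item] += 1
--     valor_moda = [item for item in dic.values()]
--     resultado_moda = [numero for numero in dic.keys() if dic[numero] == max(valor_moda) and max(valor_moda) > 1]
--
--     if len(resultado_moda) != 0:
--         frase = 'Moda = ' + str(resultado_moda)
--     else:
--         frase = 'Amostra Amodal'
--
--     return frase
-- ===== SOURCE B (Python) =====
-- def moda(valores=()):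
--     counts = {}
--     for v in valores:
--         counts[v] = counts.get(v, 0) + 1
--     best = 0
--     cands = []
--     for k, c in counts.items():
--         if c > best:
--             best = c
--             cands = [k]
--         elif c == best:
--             cands.append(k)
--     if best > 1:
--         return 'Moda = ' + str(cands)
--     return 'Amostra Amodal'
-- ===== Notes on version B (the rewrite author's own statement) =====
-- stated objective: faster
-- what changed: Counting is done with a single dict.get-based loop (no zero-prefill pass, no membership test), and the 'compute max of the values then filter the keys' phase - where A re-evaluates max(valor_moda) for every key - is replaced by one streaming argmax pass over counts.items() maintaining (best_count, candidates), so max() is never called.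
import Mathlib
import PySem

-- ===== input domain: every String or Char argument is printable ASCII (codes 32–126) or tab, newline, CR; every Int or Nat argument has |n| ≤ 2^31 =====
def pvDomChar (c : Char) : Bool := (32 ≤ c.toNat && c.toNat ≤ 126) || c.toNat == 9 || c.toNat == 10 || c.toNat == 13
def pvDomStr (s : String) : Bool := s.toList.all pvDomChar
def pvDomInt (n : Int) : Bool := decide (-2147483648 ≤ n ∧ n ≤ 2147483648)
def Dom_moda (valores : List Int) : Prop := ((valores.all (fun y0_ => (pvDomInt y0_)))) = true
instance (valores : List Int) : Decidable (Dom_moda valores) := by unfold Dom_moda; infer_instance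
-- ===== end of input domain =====

-- B replaces A's "compute max of the counts, then filter the keys" phase by a single streaming
-- (best_count, candidates) pass over the counter's items, and builds the counter in one
-- get-based loop instead of A's zero-prefill pass plus guarded increment loop (objective: faster; a timing run measured B faster).

-- ===== PORT A =====
def modaDict (valores : List Int) : PySem.Dict Int Int :=
  let dic := valores.foldl (fun d item => d.insert item 0) PySem.Dict.empty
  valores.foldl (fun d item => if d.contains item then d.modify item 0 (· + 1) else d) dic

def modaPred (dic : PySem.Dict Int Int) (valor_moda : List Int) (numero : Int) : Bool :=
  match PySem.List.max? valor_moda (fun y => y) with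
  | some m => dic.getD numero 0 == m && decide (m > 1)
  | none => false

def pyStrIntList (l : List Int) : String :=
  "[" ++ String.intercalate ", " (l.map PySem.Int.toStr) ++ "]"

def moda (valores : List Int) : String :=
  let dic := modaDict valores
  let valor_moda := dic.values
  let resultado_moda := dic.keys.filter (modaPred dic valor_moda)
  if resultado_moda.length ≠ 0 then "Moda = " ++ pyStrIntList resultado_moda
  else "Amostra Amodal"

-- ===== PORT B =====
def moda_alt (valores : List Int) : String :=
  let counts := valores.foldl (fun d v => d.insert v (d.getD v 0 + 1)) PySem.Dict.empty
  let st := counts.items.foldl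
      (fun (st : Int × List Int) p =>
        if p.2 > st.1 then (p.2, [p.1])
        else if p.2 == st.1 then (st.1, st.2 ++ [p.1])
        else st)
      (0, [])
  if st.1 > 1 then "Moda = " ++ pyStrIntList st.2 else "Amostra Amodal"


-- ===== PRECONDITION & SPEC =====
def Spec_moda (valores : List Int) (out : String) : Prop := out = moda_alt valores
instance (valores : List Int) (out : String) : Decidable (Spec_moda valores out) := by unfold Spec_moda; infer_instance

-- ===== CLAIM (what is proved, stated in full; the proofs are below) =====
def Claim_equal_moda : Prop := ∀ (valores : List Int), Dom_moda valores → Spec_moda valores (moda valores)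

-- ===== LEMMAS AND PROOFS =====

theorem guard_drop (l : List Int) (d : PySem.Dict Int Int) (h : ∀ x ∈ l, d.contains x = true) :
    l.foldl (fun d x => if d.contains x then d.modify x 0 (· + 1) else d) d
      = l.foldl (fun d x => d.modify x 0 (· + 1)) d := by
  induction l generalizing d with
  | nil => rfl
  | cons x t ih =>
    simp only [List.foldl_cons, h x (by simp), if_true]
    exact ih _ (fun y hy => by
      rw [PySem.Dict.contains_modify]
      rcases em (y = x) with h' | h'
      · simp [h']
      · simp [h y (by simp [hy])])

theorem getD_zero (l : List Int) (d : PySem.Dict Int Int) (h : ∀ k, d.getD k 0 = 0) (k : Int) :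
    (l.foldl (fun d x => d.insert x 0) d).getD k 0 = 0 := by
  induction l generalizing d with
  | nil => exact h k
  | cons x t ih =>
    exact ih _ (fun j => by rw [PySem.Dict.getD_insert]; split_ifs <;> simp [h])

theorem update_self (xs : List Int) (s : PySem.Set Int) (h : ∀ x ∈ xs, x ∈ s) :
    PySem.Set.update s xs = s := by
  induction xs generalizing s with
  | nil => rfl
  | cons x t ih =>
    have hx : PySem.Set.add s x = s := by
      simp [PySem.Set.add, h x (by simp)]
    show PySem.Set.update (PySem.Set.add s x) t = s
    rw [hx]
    exact ih s (fun y hy => h y (by simp [hy]))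
theorem stream_eq (l : List (Int × Int)) (b : Int) (cs : List Int) :
    l.foldl
      (fun (st : Int × List Int) p =>
        if p.2 > st.1 then (p.2, [p.1])
        else if p.2 == st.1 then (st.1, st.2 ++ [p.1])
        else st)
      (b, cs)
    = (l.foldl (fun a p => max a p.2) b,
       (if l.foldl (fun a p => max a p.2) b = b then cs else []) ++
       (l.filter (fun p => p.2 == l.foldl (fun a p => max a p.2) b)).map (·.1)) := by
  induction l generalizing b cs with
  | nil => simp
  | cons p t ih =>
    have hle : ∀ (a : Int) (u : List (Int × Int)), a ≤ u.foldl (fun a p => max a p.2) a := by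
      intro a u
      induction u generalizing a with
      | nil => simp
      | cons q u ihu => simpa using le_trans (le_max_left a q.2) (ihu (max a q.2))
    simp only [List.foldl_cons, List.filter_cons]
    by_cases h1 : p.2 > b
    · rw [if_pos h1, ih]
      have hmb : max b p.2 = p.2 := by omega
      simp only [hmb]
      have hM : p.2 ≤ t.foldl (fun a p => max a p.2) p.2 := hle _ _
      by_cases h2 : t.foldl (fun a p => max a p.2) p.2 = p.2
      · simp [h2, show p.2 ≠ b by omega]
      · have hne : ¬ (p.2 == t.foldl (fun a p => max a p.2) p.2) = true := by
          simp; omega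
        simp [h2, hne, show t.foldl (fun a p => max a p.2) p.2 ≠ b by omega]
    · rw [if_neg h1]
      by_cases h2 : p.2 == b
      · rw [if_pos h2, ih]
        have hb : p.2 = b := by exact_mod_cast of_decide_eq_true h2
        have hmb : max b p.2 = b := by omega
        simp only [hmb]
        by_cases h3 : t.foldl (fun a p => max a p.2) b = b
        · simp [h3, hb]
        · have : ¬ (p.2 == t.foldl (fun a p => max a p.2) b) = true := by
            simp; omega
          simp [h3, this]
      · rw [if_neg (by simpa using h2), ih]
        have hb : p.2 ≠ b := by simpa using h2
        have hlt : p.2 < b := by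
          rcases lt_or_ge p.2 b with h | h
          · exact h
          · omega
        have hmb : max b p.2 = b := by omega
        simp only [hmb]
        have hM : b ≤ t.foldl (fun a p => max a p.2) b := hle _ _
        have : ¬ (p.2 == t.foldl (fun a p => max a p.2) b) = true := by simp; omega
        simp [this]

theorem modaDict_unguard (valores : List Int) :
    modaDict valores = valores.foldl (fun d item => d.modify item 0 (· + 1))
      (valores.foldl (fun d item => d.insert item 0) PySem.Dict.empty) := by
  apply guard_drop
  intro x hx
  rw [PySem.Dict.contains_iff_mem_keys, PySem.Dict.keys_foldl_insert]
  simpa [PySem.Dict.keys_empty] using (PySem.Set.mem_ofList valores x).2 hx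

theorem modaDict_getD (valores : List Int) (k : Int) :
    (modaDict valores).getD k 0 = (valores.count k : Int) := by
  rw [modaDict_unguard, PySem.Dict.getD_foldl_modify_add_one,
      getD_zero valores PySem.Dict.empty (fun j => PySem.Dict.getD_empty j 0) k]
  ring

theorem modaDict_keys (valores : List Int) :
    (modaDict valores).keys = PySem.Set.ofList valores := by
  rw [modaDict_unguard, PySem.Dict.keys_foldl_modify, PySem.Dict.keys_foldl_insert]
  have h : (PySem.Dict.empty : PySem.Dict Int Int).keys = [] := PySem.Dict.keys_empty
  rw [h]
  have h2 : PySem.Set.update ([] : PySem.Set Int) valores = PySem.Set.ofList valores := rfl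
  rw [h2]
  exact update_self _ _ (fun x hx => (PySem.Set.mem_ofList valores x).2 hx)

theorem modaDict_values (valores : List Int) :
    (modaDict valores).values = (PySem.Set.ofList valores).map (fun k => (valores.count k : Int)) := by
  have hnodup : (modaDict valores).keys.Nodup := by
    rw [modaDict_keys]; exact PySem.Set.nodup_ofList _
  rw [PySem.Dict.values_eq_map_keys (modaDict valores) hnodup 0, modaDict_keys]
  exact List.map_congr_left (fun k _ => modaDict_getD valores k)

theorem modaPred_some (d : PySem.Dict Int Int) (vm : List Int) (m : Int)
    (h : PySem.List.max? vm (fun y => y) = some m) (n : Int) :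
    modaPred d vm n = (d.getD n 0 == m && decide (m > 1)) := by
  unfold modaPred; rw [h]

theorem moda_eq_alt (valores : List Int) : moda valores = moda_alt valores := by
  have hA : moda valores =
      (if (((modaDict valores).keys.filter
            (modaPred (modaDict valores) (modaDict valores).values)).length ≠ 0)
        then "Moda = " ++ pyStrIntList ((modaDict valores).keys.filter
            (modaPred (modaDict valores) (modaDict valores).values))
        else "Amostra Amodal") := rfl
  have hB : moda_alt valores =
      (if (((PySem.Dict.counter valores).items.foldl
          (fun (st : Int × List Int) p =>
            if p.2 > st.1 then (p.2, [p.1])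
            else if p.2 == st.1 then (st.1, st.2 ++ [p.1])
            else st) (0, [])).1 > 1)
        then "Moda = " ++ pyStrIntList ((PySem.Dict.counter valores).items.foldl
          (fun (st : Int × List Int) p =>
            if p.2 > st.1 then (p.2, [p.1])
            else if p.2 == st.1 then (st.1, st.2 ++ [p.1])
            else st) (0, [])).2
        else "Amostra Amodal") := rfl
  rw [hA, hB]
  rw [PySem.Dict.items_counter, stream_eq]
  simp only [modaDict_keys, modaDict_values, ite_self, List.nil_append]
  cases hS : PySem.Set.ofList valores with
  | nil => simp
  | cons k S' =>
    have hkmem : k ∈ valores := by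
      have : k ∈ PySem.Set.ofList valores := by rw [hS]; simp
      exact (PySem.Set.mem_ofList _ _).1 this
    have hck : 1 ≤ (valores.count k : Int) := by
      exact_mod_cast List.one_le_count_iff.2 hkmem
    simp only [List.map_cons, List.foldl_cons,
      show max 0 ((valores.count k : Int)) = (valores.count k : Int) by omega,
      List.foldl_map]
    set m := S'.foldl (fun a x => max a ((valores.count x : Int))) ((valores.count k : Int)) with hmdef
    have hmax' : PySem.List.max? (((valores.count k : Int)) :: S'.map (fun x => (valores.count x : Int))) (fun y => y) = some m := by
      rw [PySem.List.max?_id_cons, List.foldl_map]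
    by_cases hm : m > 1
    · have hfun : modaPred (modaDict valores)
          (((valores.count k : Int)) :: S'.map (fun x => (valores.count x : Int)))
          = (fun n => ((valores.count n : Int) == m)) := by
        funext n
        rw [modaPred_some _ _ _ hmax', modaDict_getD]
        simp [hm]
      rw [hfun, if_pos hm]
      have hmem : m ∈ ((valores.count k : Int)) :: S'.map (fun x => (valores.count x : Int)) :=
        PySem.List.max?_mem hmax'
      have hmem' : m ∈ (k :: S').map (fun x => (valores.count x : Int)) := by simpa using hmem
      obtain ⟨x, hx, hxm⟩ := List.mem_map.1 hmem'
      have hlen : ((k :: S').filter (fun n => ((valores.count n : Int) == m))).length ≠ 0 := by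
        simp only [ne_eq, List.length_eq_zero_iff]
        intro hnil
        have hxin : x ∈ (k :: S').filter (fun n => ((valores.count n : Int) == m)) :=
          List.mem_filter.2 ⟨hx, by simp [hxm]⟩
        rw [hnil] at hxin
        simp at hxin
      rw [if_pos hlen]
      congr 1
      rw [show ((k, ((valores.count k : Int))) :: S'.map (fun x => (x, (valores.count x : Int))))
          = (k :: S').map (fun x => (x, (valores.count x : Int))) from by simp]
      rw [List.filter_map, List.map_map]
      simp [Function.comp_def]
    · have hfun : modaPred (modaDict valores)
          (((valores.count k : Int)) :: S'.map (fun x => (valores.count x : Int)))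
          = (fun _ => false) := by
        funext n
        rw [modaPred_some _ _ _ hmax', modaDict_getD]
        simp [hm]
      rw [hfun]
      simp [hm]

-- ===== VERDICT (by name: the statement is the Claim_ definition above) =====
theorem moda_spec : Claim_equal_moda := by
  intro valores _
  unfold Spec_moda
  exact moda_eq_alt valores
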